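-- pv_equiv track=rewrite | github.com/lapo-s/seeing-through-green-code | python_scripts/match.py | count_proximity_matches
-- ===== SOURCE A (Python) =====
-- def count_proximity_matches(positions_list, max_distance=20):
--     """Counts how many times all keywords are within max_distance words of each other."""
--     if not positions_list or any(len(positions) == 0 for positions in positions_list):
--         return 0
--
--     count = 0
--     for i, pos in enumerate(positions_list[0]):
--         if all(any(abs(pos - other_pos) <= max_distance for other_pos in other_positions)
--                for other_positions in positions_list[1:]):
--             count += 1
--     return count
-- ===== SOURCE B (Python) =====
-- def count_proximity_matches(positions_list, max_distance=20):
--     """Counts how many times all keywords are within max_distance words of each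
--     other: each non-first positions list is sorted once and probed by binary
--     search for an element in [pos - max_distance, pos + max_distance]."""
--     if not positions_list or any(len(positions) == 0 for positions in positions_list):
--         return 0
--     sorted_others = [sorted(other) for other in positions_list[1:]]
--     count = 0
--     for pos in positions_list[0]:
--         if all(_has_in_range(xs, pos - max_distance, pos + max_distance)
--                for xs in sorted_others):
--             count += 1
--     return count
--
--
-- def _has_in_range(xs, lo, hi):
--     """xs sorted ascending: is there an element of xs in [lo, hi]?"""
--     a, b = 0, len(xs)
--     while a < b:
--         m = (a + b) // 2
--         if xs[m] < lo:
--             a = m + 1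
--         else:
--             b = m
--     return a < len(xs) and xs[a] <= hi
-- ===== Notes on version B (the rewrite author's own statement) =====
-- stated objective: alternative
-- what changed: B sorts each non-first positions list once and replaces A's inner linear scan per (pos, list) pair with a hand-written binary search for an element in [pos-d, pos+d].
import Mathlib
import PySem

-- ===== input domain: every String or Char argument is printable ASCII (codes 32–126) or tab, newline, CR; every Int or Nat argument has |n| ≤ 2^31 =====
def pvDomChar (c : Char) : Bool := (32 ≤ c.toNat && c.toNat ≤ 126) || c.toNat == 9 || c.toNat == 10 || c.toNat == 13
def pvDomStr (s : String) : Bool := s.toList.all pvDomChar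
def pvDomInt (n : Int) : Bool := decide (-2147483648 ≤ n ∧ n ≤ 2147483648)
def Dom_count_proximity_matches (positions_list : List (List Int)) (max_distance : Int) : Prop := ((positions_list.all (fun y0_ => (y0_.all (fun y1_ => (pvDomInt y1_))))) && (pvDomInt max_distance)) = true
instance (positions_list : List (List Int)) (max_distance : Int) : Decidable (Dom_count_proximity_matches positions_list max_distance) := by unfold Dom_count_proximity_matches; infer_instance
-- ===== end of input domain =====

-- B sorts each non-first positions list once and replaces A's inner linear
-- scan per (pos, list) pair with a binary search; return values are proved equal.

-- ===== PORT A =====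
def count_proximity_matches (positions_list : List (List Int)) (max_distance : Int) : Int :=
  if positions_list.isEmpty || positions_list.any (fun positions => positions.length == 0) then 0
  else
    (positions_list.headD []).foldl
      (fun count pos =>
        if (positions_list.drop 1).all
            (fun other_positions => other_positions.any
              (fun other_pos => decide (|pos - other_pos| ≤ max_distance))) then
          count + 1
        else count) 0

-- ===== PORT B =====
-- Source B's hand-written binary search (the while loop over (a, b));
-- fuel = b - a bounds the iteration count, so the recursion is structural
def pvBsearch (xs : List Int) (lo : Int) : Nat → Nat → Nat → Nat
  | 0, a, _ => a
  | fuel + 1, a, b =>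
    if a < b then
      let m := (a + b) / 2
      if xs.getD m 0 < lo then pvBsearch xs lo fuel (m + 1) b
      else pvBsearch xs lo fuel a m
    else a

def pvHasInRange (xs : List Int) (lo hi : Int) : Bool :=
  let a := pvBsearch xs lo xs.length 0 xs.length
  decide (a < xs.length) && decide (xs.getD a 0 ≤ hi)

def count_proximity_matches_alt (positions_list : List (List Int)) (max_distance : Int) : Int :=
  if positions_list.isEmpty || positions_list.any (fun positions => positions.length == 0) then 0
  else
    let sorted_others := (positions_list.drop 1).map
      (fun other => PySem.List.sorted other (fun x => x) false)
    (positions_list.headD []).foldl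
      (fun count pos =>
        if sorted_others.all
            (fun xs => pvHasInRange xs (pos - max_distance) (pos + max_distance)) then
          count + 1
        else count) 0

-- ===== PRECONDITION & SPEC =====
def Spec_count_proximity_matches (positions_list : List (List Int)) (max_distance : Int) (out : Int) : Prop := out = count_proximity_matches_alt positions_list max_distance
instance (positions_list : List (List Int)) (max_distance : Int) (out : Int) : Decidable (Spec_count_proximity_matches positions_list max_distance out) := by unfold Spec_count_proximity_matches; infer_instance

-- ===== CLAIM (what is proved, stated in full; the proofs are below) =====
def Claim_equal_count_proximity_matches : Prop := ∀ (positions_list : List (List Int)) (max_distance : Int), Dom_count_proximity_matches positions_list max_distance → Spec_count_proximity_matches positions_list max_distance (count_proximity_matches positions_list max_distance)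

-- ===== LEMMAS AND PROOFS =====

-- binary-search invariant: on a list monotone by index, pvBsearch xs lo a b
-- splits [a,b) into a prefix of elements < lo and a suffix of elements ≥ lo
theorem pvBsearch_spec (xs : List Int) (lo : Int)
    (hmono : ∀ p q : Nat, p ≤ q → q < xs.length → xs.getD p 0 ≤ xs.getD q 0) :
    ∀ (fuel a b : Nat), b - a ≤ fuel → a ≤ b → b ≤ xs.length →
      a ≤ pvBsearch xs lo fuel a b ∧ pvBsearch xs lo fuel a b ≤ b ∧
      (∀ i, a ≤ i → i < pvBsearch xs lo fuel a b → xs.getD i 0 < lo) ∧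
      (∀ i, pvBsearch xs lo fuel a b ≤ i → i < b → lo ≤ xs.getD i 0) := by
  intro fuel
  induction fuel with
  | zero =>
    intro a b hn hab hb
    have hba : a = b := by omega
    subst hba
    rw [show pvBsearch xs lo 0 a a = a from rfl]
    exact ⟨le_refl a, le_refl a, by omega, by omega⟩
  | succ fuel ih =>
    intro a b hn hab hb
    rw [pvBsearch]
    by_cases h : a < b
    · simp only [h, if_pos]
      set m := (a + b) / 2 with hm
      have ham : a ≤ m := by omega
      have hmb : m < b := by omega
      by_cases hc : xs.getD m 0 < lo
      · simp only [hc, if_pos]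
        obtain ⟨h1, h2, h3, h4⟩ := ih (m + 1) b (by omega) (by omega) hb
        refine ⟨by omega, h2, ?_, h4⟩
        intro i hai hir
        by_cases him : i ≤ m
        · exact lt_of_le_of_lt (hmono i m him (by omega)) hc
        · exact h3 i (by omega) hir
      · simp only [hc, if_neg, not_false_iff]
        obtain ⟨h1, h2, h3, h4⟩ := ih a m (by omega) (by omega) (by omega)
        refine ⟨h1, by omega, h3, ?_⟩
        intro i hri hib
        by_cases him : m ≤ i
        · exact le_trans (le_of_not_gt hc) (hmono m i him (by omega))
        · exact h4 i hri (by omega)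
    · simp only [h, if_neg, not_false_iff]
      exact ⟨le_refl a, by omega, by omega, by omega⟩

theorem getD_mem (xs : List Int) (i : Nat) (h : i < xs.length) : xs.getD i 0 ∈ xs := by
  rw [List.getD_eq_getElem xs 0 h]
  exact List.getElem_mem h

-- pvHasInRange on a sorted list decides "some element lies in [lo, hi]"
theorem pvHasInRange_iff (xs : List Int)
    (hmono : ∀ p q : Nat, p ≤ q → q < xs.length → xs.getD p 0 ≤ xs.getD q 0)
    (lo hi : Int) :
    pvHasInRange xs lo hi = true ↔ ∃ q ∈ xs, lo ≤ q ∧ q ≤ hi := by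
  unfold pvHasInRange
  obtain ⟨h1, h2, h3, h4⟩ :=
    pvBsearch_spec xs lo hmono xs.length 0 xs.length (by omega) (Nat.zero_le _) le_rfl
  set r := pvBsearch xs lo xs.length 0 xs.length with hr
  simp only [Bool.and_eq_true, decide_eq_true_eq]
  constructor
  · rintro ⟨hlt, hle⟩
    exact ⟨xs.getD r 0, getD_mem xs r hlt, h4 r le_rfl hlt, hle⟩
  · rintro ⟨q, hq, hloq, hqhi⟩
    obtain ⟨i, hilt, hieq⟩ := List.getElem_of_mem hq
    have hgd : xs.getD i 0 = q := by rw [List.getD_eq_getElem xs 0 hilt, hieq]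
    have hri : r ≤ i := by
      by_contra hc
      have := h3 i (Nat.zero_le _) (by omega)
      omega
    refine ⟨by omega, ?_⟩
    calc xs.getD r 0 ≤ xs.getD i 0 := hmono r i hri hilt
      _ ≤ hi := by omega

theorem sorted_getD_mono (ys : List Int) :
    ∀ p q : Nat, p ≤ q → q < (PySem.List.sorted ys (fun x => x) false).length →
      (PySem.List.sorted ys (fun x => x) false).getD p 0 ≤ (PySem.List.sorted ys (fun x => x) false).getD q 0 := by
  intro p q hpq hq
  have hp : p < (PySem.List.sorted ys (fun x => x) false).length := by omega
  rw [List.getD_eq_getElem _ 0 hp, List.getD_eq_getElem _ 0 hq]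
  exact PySem.List.sorted_id_getElem_mono ys hpq hq

-- the per-(pos, other list) conditions of A and B agree
theorem cond_eq (other : List Int) (pos d : Int) :
    pvHasInRange (PySem.List.sorted other (fun x => x) false) (pos - d) (pos + d)
      = other.any (fun q => decide (|pos - q| ≤ d)) := by
  rw [Bool.eq_iff_iff, pvHasInRange_iff _ (sorted_getD_mono other), List.any_eq_true]
  constructor
  · rintro ⟨q, hq, h1, h2⟩
    exact ⟨q, (PySem.List.mem_sorted other _ _ q).mp hq,
      by rw [decide_eq_true_eq, abs_le]; omega⟩
  · rintro ⟨q, hq, hd⟩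
    rw [decide_eq_true_eq, abs_le] at hd
    exact ⟨q, (PySem.List.mem_sorted other _ _ q).mpr hq, by omega, by omega⟩

-- ===== VERDICT (by name: the statement is the Claim_ definition above) =====
theorem count_proximity_matches_spec : Claim_equal_count_proximity_matches := by
  intro positions_list max_distance _
  unfold Spec_count_proximity_matches count_proximity_matches count_proximity_matches_alt
  by_cases hg : positions_list.isEmpty || positions_list.any (fun positions => positions.length == 0)
  · simp [hg]
  · simp only [hg]
    have hfun :
        (fun (count pos : Int) =>
          if (List.map (fun other => PySem.List.sorted other (fun x => x) false)
                (positions_list.drop 1)).all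
              (fun xs => pvHasInRange xs (pos - max_distance) (pos + max_distance)) = true then
            count + 1
          else count)
        = (fun (count pos : Int) =>
          if (positions_list.drop 1).all
              (fun other_positions => other_positions.any
                (fun other_pos => decide (|pos - other_pos| ≤ max_distance))) = true then
            count + 1
          else count) := by
      funext count pos
      have hp : ((fun xs => pvHasInRange xs (pos - max_distance) (pos + max_distance)) ∘
            (fun other => PySem.List.sorted other (fun x => x) false))
          = (fun other_positions => other_positions.any
              (fun other_pos => decide (|pos - other_pos| ≤ max_distance))) :=
        funext (fun other => cond_eq other pos max_distance)
      rw [List.all_map, hp]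
    rw [hfun]
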